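-- pv_equiv track=rewrite | github.com/Bai1026/PBC | Mid_2/mid2-4.py | find_adjacent_min_differences
-- ===== SOURCE A (Python) =====
-- def find_adjacent_min_differences(lst, d):
--     new_list = []
--     for idx, i in enumerate(lst):
--
--         differences = [abs(i - j) for j in lst if i != j]
--
--         min_difference = min(differences)
--
--         if min_difference >= d:
--             new_list.append(idx+1)
--     return new_list
-- ===== SOURCE B (Python) =====
-- def find_adjacent_min_differences(lst, d):
--     uniq = sorted(set(lst))
--     near = {}
--     for t, v in enumerate(uniq):
--         cands = []
--         if t > 0:
--             cands.append(v - uniq[t - 1])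
--         if t + 1 < len(uniq):
--             cands.append(uniq[t + 1] - v)
--         near[v] = min(cands)
--     return [idx + 1 for idx, v in enumerate(lst) if near[v] >= d]
-- ===== Notes on version B (the rewrite author's own statement) =====
-- stated objective: faster
-- what changed: Replaces the per-index O(n) scan of the whole list by sorting the distinct values once and reading each element's nearest distinct neighbour off its adjacent gaps in the sorted unique array (memoised in a dict).
import Mathlib
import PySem

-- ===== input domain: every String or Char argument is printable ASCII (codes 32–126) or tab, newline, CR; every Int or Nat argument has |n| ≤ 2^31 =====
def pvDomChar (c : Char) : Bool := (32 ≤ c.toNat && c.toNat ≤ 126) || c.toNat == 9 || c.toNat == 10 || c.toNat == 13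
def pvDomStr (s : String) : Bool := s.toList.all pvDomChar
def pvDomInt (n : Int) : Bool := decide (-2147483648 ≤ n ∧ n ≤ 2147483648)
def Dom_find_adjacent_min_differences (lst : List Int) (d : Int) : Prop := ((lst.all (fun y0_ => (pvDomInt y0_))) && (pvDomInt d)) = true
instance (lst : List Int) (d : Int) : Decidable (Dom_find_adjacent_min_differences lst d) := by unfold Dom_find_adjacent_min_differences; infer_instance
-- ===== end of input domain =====

-- B sorts the distinct values once and reads each element's nearest distinct difference
-- off the adjacent gaps in that sorted unique array, instead of A's per-index full scan.

-- ===== PORT A =====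
def find_adjacent_min_differences (lst : List Int) (d : Int) : List Int :=
  (PySem.List.enumerate lst 0).foldl (fun acc p =>
    let differences := (lst.filter (fun j => p.2 != j)).map (fun j => |p.2 - j|)
    match PySem.List.min? differences (fun x => x) with
    | none => acc   -- Python's min([]) raises ValueError here; such inputs are outside Pre_
    | some m => if d ≤ m then acc ++ [p.1 + 1] else acc) []

-- ===== PORT B =====
-- the 'cands' list built in Source B's loop body: the at-most-two adjacent gaps of entry t
def pvCands (uniq : List Int) (t : Int) (v : Int) : List Int :=
  (if 0 < t then [v - PySem.List.pyGetD uniq (t - 1) 0] else []) ++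
  (if t + 1 < (uniq.length : Int) then [PySem.List.pyGetD uniq (t + 1) 0 - v] else [])

-- the 'near' dict of Source B: nearest distinct-value difference for each sorted unique value.
-- Python's min(cands) raises when cands = [] (a single distinct value); outside Pre_.
def pvNearDict (uniq : List Int) : PySem.Dict Int Int :=
  (PySem.List.enumerate uniq 0).foldl (fun nd p =>
    nd.insert p.2 ((PySem.List.min? (pvCands uniq p.1 p.2) (fun x => x)).getD 0))
    PySem.Dict.empty

def find_adjacent_min_differences_alt (lst : List Int) (d : Int) : List Int :=
  let uniq := PySem.List.sorted (PySem.Set.ofList lst) (fun x => x) false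
  let near := pvNearDict uniq
  ((PySem.List.enumerate lst 0).filter (fun p => decide (d ≤ near.getD p.2 0))).map
    (fun p => p.1 + 1)

-- ===== PRECONDITION & SPEC =====
-- Pre_ excludes nonempty lists whose elements are all equal: there both A and B raise
-- ValueError (min() of an empty sequence).
def Pre_find_adjacent_min_differences (lst : List Int) (d : Int) : Prop :=
  lst = [] ∨ 2 ≤ (PySem.List.dedup lst).length
instance (lst : List Int) (d : Int) : Decidable (Pre_find_adjacent_min_differences lst d) := by unfold Pre_find_adjacent_min_differences; infer_instance

def pvWitness_find_adjacent_min_differences : List Int × Int := ([1, 5, 5, 9], 3)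

def Spec_find_adjacent_min_differences (lst : List Int) (d : Int) (out : List Int) : Prop := out = find_adjacent_min_differences_alt lst d
instance (lst : List Int) (d : Int) (out : List Int) : Decidable (Spec_find_adjacent_min_differences lst d out) := by unfold Spec_find_adjacent_min_differences; infer_instance

-- ===== CLAIM (what is proved, stated in full; the proofs are below) =====
def Claim_equal_find_adjacent_min_differences : Prop := ∀ (lst : List Int) (d : Int), Dom_find_adjacent_min_differences lst d → Pre_find_adjacent_min_differences lst d → Spec_find_adjacent_min_differences lst d (find_adjacent_min_differences lst d)

-- ===== LEMMAS AND PROOFS =====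

-- strict monotonicity of a (·<·)-pairwise list at indices
theorem pv_mono {u : List Int} (hpw : u.Pairwise (· < ·)) {s t : Nat}
    (hs : s < u.length) (ht : t < u.length) (hst : s < t) : u[s] < u[t] :=
  List.pairwise_iff_getElem.mp hpw s t hs ht hst

-- dict lookup: the value stored at u[t] is the min of the adjacent gaps at t
theorem pv_near_getD (u : List Int) (hpw : u.Pairwise (· < ·)) (t : Nat)
    (ht : t < u.length) :
    (pvNearDict u).getD u[t] 0
      = (PySem.List.min? (pvCands u (t : Int) u[t]) (fun x => x)).getD 0 := by
  have hnd : u.Nodup := hpw.imp ne_of_lt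
  have hmapk : List.map (fun a => a.2) (PySem.List.enumerate u 0) = u :=
    PySem.List.map_snd_enumerate u 0
  have hitems : (pvNearDict u).items =
      PySem.Dict.empty.items ++ List.map
        (fun a => (a.2, (PySem.List.min? (pvCands u a.1 a.2) (fun x => x)).getD 0))
        (PySem.List.enumerate u 0) := by
    exact PySem.Dict.items_foldl_insert_fresh (PySem.List.enumerate u 0)
      (fun a => a.2)
      (fun a => (PySem.List.min? (pvCands u a.1 a.2) (fun x => x)).getD 0)
      PySem.Dict.empty
      (by intro a _; simp [PySem.Dict.contains_empty])
      (by rw [hmapk]; exact hnd)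
  have hkeys : (pvNearDict u).keys = u := by
    simp only [PySem.Dict.keys, hitems]
    simp [List.map_map, Function.comp_def, hmapk, PySem.Dict.empty]
  have hmem : (u[t], (PySem.List.min? (pvCands u ((0 : Int) + (t : Nat)) u[t])
      (fun x => x)).getD 0) ∈ (pvNearDict u).items := by
    rw [hitems]
    refine List.mem_append_right _ (List.mem_map.mpr ⟨((0 : Int) + (t : Nat), u[t]), ?_, rfl⟩)
    exact (PySem.List.mem_enumerate_iff u 0 _).mpr ⟨t, ht, rfl⟩
  have hkn : (pvNearDict u).keys.Nodup := by rw [hkeys]; exact hnd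
  have := PySem.Dict.getD_of_mem_items (pvNearDict u) hmem hkn 0
  simpa using this

-- every candidate gap is |u[t] - w| for some other member w of u
theorem pv_cands_mem (u : List Int) (hpw : u.Pairwise (· < ·)) (t : Nat)
    (ht : t < u.length) (x : Int) (hx : x ∈ pvCands u (t : Int) u[t]) :
    ∃ w ∈ u, w ≠ u[t] ∧ x = |u[t] - w| := by
  unfold pvCands at hx
  rcases List.mem_append.mp hx with h | h
  · obtain ⟨h0, h⟩ := List.mem_ite_nil_right.mp h
    · rw [List.mem_singleton] at h
      have ht1 : t - 1 < u.length := by omega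
      have hc : ((t : Int) - 1) = ((t - 1 : Nat) : Int) := by omega
      have hget : PySem.List.pyGetD u ((t : Int) - 1) 0 = u[t - 1] := by
        rw [hc, PySem.List.pyGetD_natCast]; exact List.getD_eq_getElem u 0 ht1
      have hlt : u[t - 1] < u[t] := pv_mono hpw ht1 ht (by omega)
      refine ⟨u[t - 1], List.getElem_mem ht1, ne_of_lt hlt, ?_⟩
      rw [h, hget, abs_of_pos (by omega)]
  · obtain ⟨h1, h⟩ := List.mem_ite_nil_right.mp h
    · rw [List.mem_singleton] at h
      have ht1 : t + 1 < u.length := by omega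
      have hc : ((t : Int) + 1) = ((t + 1 : Nat) : Int) := by omega
      have hget : PySem.List.pyGetD u ((t : Int) + 1) 0 = u[t + 1] := by
        rw [hc, PySem.List.pyGetD_natCast]; exact List.getD_eq_getElem u 0 ht1
      have hlt : u[t] < u[t + 1] := pv_mono hpw ht ht1 (by omega)
      refine ⟨u[t + 1], List.getElem_mem ht1, ne_of_gt hlt, ?_⟩
      rw [h, hget, abs_of_neg (by omega)]; ring

-- with at least two distinct values, the candidate list is nonempty
theorem pv_cands_ne_nil (u : List Int) (hlen : 2 ≤ u.length) (t : Nat)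
    (ht : t < u.length) (v : Int) : pvCands u (t : Int) v ≠ [] := by
  unfold pvCands
  by_cases h0 : 0 < (t : Int)
  · refine List.append_ne_nil_of_left_ne_nil ?_ _
    rw [if_pos h0]; simp
  · refine List.append_ne_nil_of_right_ne_nil _ ?_
    have h1 : (t : Int) + 1 < (u.length : Int) := by omega
    rw [if_pos h1]; simp

-- for any other index s, some candidate gap is ≤ |u[t] - u[s]|
theorem pv_cands_le (u : List Int) (hpw : u.Pairwise (· < ·)) (t : Nat)
    (ht : t < u.length) (s : Nat) (hs : s < u.length) (hst : s ≠ t) :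
    ∃ x ∈ pvCands u (t : Int) u[t], x ≤ |u[t] - u[s]| := by
  rcases Nat.lt_or_ge s t with hlt | hge
  · -- s < t : the left gap u[t] - u[t-1] works
    have h0 : 0 < (t : Int) := by omega
    have ht1 : t - 1 < u.length := by omega
    have hc : ((t : Int) - 1) = ((t - 1 : Nat) : Int) := by omega
    have hget : PySem.List.pyGetD u ((t : Int) - 1) 0 = u[t - 1] := by
      rw [hc, PySem.List.pyGetD_natCast]; exact List.getD_eq_getElem u 0 ht1
    refine ⟨u[t] - u[t - 1], ?_, ?_⟩
    · unfold pvCands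
      refine List.mem_append_left _ ?_
      rw [if_pos h0, hget]; simp
    · have h1 : u[s] ≤ u[t - 1] := by
        rcases Nat.lt_or_ge s (t - 1) with h | h
        · exact le_of_lt (pv_mono hpw hs ht1 h)
        · have hseq : s = t - 1 := by omega
          subst hseq; exact le_rfl
      have h2 : u[s] < u[t] := pv_mono hpw hs ht hlt
      rw [abs_of_pos (by omega)]; omega
  · -- t < s : the right gap u[t+1] - u[t] works
    have hts : t < s := by omega
    have ht1 : t + 1 < u.length := by omega
    have h1i : (t : Int) + 1 < (u.length : Int) := by omega
    have hc : ((t : Int) + 1) = ((t + 1 : Nat) : Int) := by omega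
    have hget : PySem.List.pyGetD u ((t : Int) + 1) 0 = u[t + 1] := by
      rw [hc, PySem.List.pyGetD_natCast]; exact List.getD_eq_getElem u 0 ht1
    refine ⟨u[t + 1] - u[t], ?_, ?_⟩
    · unfold pvCands
      refine List.mem_append_right _ ?_
      rw [if_pos h1i, hget]; simp
    · have h1 : u[t + 1] ≤ u[s] := by
        rcases Nat.lt_or_ge (t + 1) s with h | h
        · exact le_of_lt (pv_mono hpw ht1 hs h)
        · have hseq : t + 1 = s := by omega
          subst hseq; exact le_rfl
      have h2 : u[t] < u[s] := pv_mono hpw ht hs hts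
      rw [abs_of_neg (by omega)]; omega

-- A's inner min over the whole list equals B's memoised nearest gap
theorem pv_minA (lst : List Int) (h2 : 2 ≤ (PySem.Set.ofList lst).length)
    (v : Int) (hv : v ∈ lst) :
    PySem.List.min? ((lst.filter (fun j => v != j)).map (fun j => |v - j|)) (fun x => x)
      = some ((pvNearDict (PySem.List.sorted (PySem.Set.ofList lst) (fun x => x) false)).getD v 0) := by
  set u := PySem.List.sorted (PySem.Set.ofList lst) (fun x => x) false with hu
  have hpw : u.Pairwise (· < ·) := PySem.List.sorted_ofList_pairwise_lt lst
  have hlen : 2 ≤ u.length := by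
    rw [hu, PySem.List.length_sorted]; exact h2
  have hmemu : ∀ x : Int, x ∈ u ↔ x ∈ lst := by
    intro x
    rw [hu, PySem.List.mem_sorted, PySem.Set.mem_ofList]
  obtain ⟨t, ht, htv⟩ := List.mem_iff_getElem.mp ((hmemu v).mpr hv)
  subst htv
  rw [pv_near_getD u hpw t ht]
  -- the min of the candidate list
  obtain ⟨c, hc⟩ : ∃ c, PySem.List.min? (pvCands u (t : Int) u[t]) (fun x => x) = some c := by
    cases hmc : PySem.List.min? (pvCands u (t : Int) u[t]) (fun x => x) with
    | none => exact (pv_cands_ne_nil u hlen t ht u[t]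
        ((PySem.List.min?_eq_none_iff _ _).mp hmc)).elim
    | some c => exact ⟨c, rfl⟩
  rw [hc, Option.getD_some]
  obtain ⟨w, hwu, hwne, hcw⟩ := pv_cands_mem u hpw t ht c (PySem.List.min?_mem hc)
  have hcmin : ∀ y ∈ pvCands u (t : Int) u[t], c ≤ y := PySem.List.min?_isMin hc
  -- c is a member of A's difference list
  have hcdiff : c ∈ (lst.filter (fun j => u[t] != j)).map (fun j => |u[t] - j|) := by
    refine List.mem_map.mpr ⟨w, List.mem_filter.mpr ⟨(hmemu w).mp hwu, ?_⟩, hcw.symm⟩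
    simp [bne, hwne.symm]
  obtain ⟨m, hm⟩ : ∃ m, PySem.List.min? ((lst.filter (fun j => u[t] != j)).map
      (fun j => |u[t] - j|)) (fun x => x) = some m := by
    cases hmm : PySem.List.min? ((lst.filter (fun j => u[t] != j)).map
        (fun j => |u[t] - j|)) (fun x => x) with
    | none =>
        rw [PySem.List.min?_eq_none_iff] at hmm
        rw [hmm] at hcdiff
        exact absurd hcdiff List.not_mem_nil
    | some m => exact ⟨m, rfl⟩
  rw [hm]
  -- m ≤ c
  have hmc : m ≤ c := PySem.List.min?_isMin hm c hcdiff
  -- c ≤ m : m = |u[t] - w'| for some other member w', dominated by a candidate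
  obtain ⟨w', hw', hmw'⟩ := List.mem_map.mp (PySem.List.min?_mem hm)
  obtain ⟨hw'l, hw'ne⟩ := List.mem_filter.mp hw'
  have hw'u : w' ∈ u := (hmemu w').mpr hw'l
  obtain ⟨s, hsl, hsw⟩ := List.mem_iff_getElem.mp hw'u
  have hw'net : w' ≠ u[t] := by
    intro h
    simp [bne, h] at hw'ne
  have hst : s ≠ t := by
    intro h; subst h; exact hw'net hsw.symm
  obtain ⟨x, hxc, hxle⟩ := pv_cands_le u hpw t ht s hsl hst
  have hcm : c ≤ m := by
    calc c ≤ x := hcmin x hxc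
    _ ≤ |u[t] - u[s]| := hxle
    _ = m := by rw [hsw, hmw']
  exact congrArg some (le_antisymm hmc hcm)

-- ===== VERDICT (by name: the statement is the Claim_ definition above) =====
theorem find_adjacent_min_differences_spec : Claim_equal_find_adjacent_min_differences := by
  intro lst d _ hpre
  unfold Spec_find_adjacent_min_differences
  rcases hpre with hnil | h2
  · subst hnil; rfl
  · rw [PySem.List.dedup_eq_ofList] at h2
    unfold find_adjacent_min_differences find_adjacent_min_differences_alt
    simp only []
    rw [PySem.List.foldl_congr_mem (PySem.List.enumerate lst 0) _
      (fun acc p => if (decide (d ≤ (pvNearDict (PySem.List.sorted (PySem.Set.ofList lst)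
        (fun x => x) false)).getD p.2 0)) = true then acc ++ [p.1 + 1] else acc) []
      ?_]
    · rw [PySem.List.foldl_append_if]
      simp
    · intro acc p hp
      obtain ⟨k, hk, hpk⟩ := (PySem.List.mem_enumerate_iff lst 0 p).mp hp
      have hp2 : p.2 ∈ lst := by rw [hpk]; exact List.getElem_mem hk
      simp only [pv_minA lst h2 p.2 hp2]
      by_cases hd : d ≤ (pvNearDict (PySem.List.sorted (PySem.Set.ofList lst)
          (fun x => x) false)).getD p.2 0
      · simp [hd]
      · simp [hd]
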